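-- pv_equiv track=rewrite | github.com/amits0003/Selenium_Study_Files | SeleniumTest/problem_solving_section/max_min_arrange_in_array.py | arrange_arr
-- ===== SOURCE A (Python) =====
-- def arrange_arr(arr):
--     n = len(arr)
--     temp = n * [None]
--
--     small, large = 0, n - 1
--
--     flag = True
--
--     for i in range(n):
--         if flag is True:
--             temp[i] = arr[large]
--             large -= 1
--         else:
--             temp[i] = arr[small]
--             small += 1
--
--         flag = bool(1 - flag)
--
--     for i in range(n):
--         arr[i] = temp[i]
--
--     return arr
-- ===== SOURCE B (Python) =====
-- def arrange_arr(arr):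
--     n = len(arr)
--     result = n * [None]
--     result[0::2] = arr[::-1][:(n + 1) // 2]
--     result[1::2] = arr[:n // 2]
--     for i in range(n):
--         arr[i] = result[i]
--     return arr
-- ===== Notes on version B (the rewrite author's own statement) =====
-- stated objective: idiomatic
-- what changed: Replaces the toggle-flag loop with two small/large pointers by strided slice assignment: the even slots get the reversed top half, the odd slots the bottom half, then the result is copied back element-wise.
import Mathlib
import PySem

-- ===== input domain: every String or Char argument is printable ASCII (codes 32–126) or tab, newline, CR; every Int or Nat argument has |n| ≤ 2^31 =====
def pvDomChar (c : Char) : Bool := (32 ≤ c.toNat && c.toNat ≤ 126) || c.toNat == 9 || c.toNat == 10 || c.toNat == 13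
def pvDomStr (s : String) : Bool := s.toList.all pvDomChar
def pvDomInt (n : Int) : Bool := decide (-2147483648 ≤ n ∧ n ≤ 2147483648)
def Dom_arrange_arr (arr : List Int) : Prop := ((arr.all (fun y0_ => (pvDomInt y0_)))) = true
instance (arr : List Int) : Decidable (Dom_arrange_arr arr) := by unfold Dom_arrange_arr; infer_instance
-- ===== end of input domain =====

-- B replaces A's toggle-flag loop with two pointers by strided slice assignment of the
-- reversed top half / bottom half (objective: idiomatic). Both Pythons mutate `arr` in
-- place (B element-wise, like A); the theorems below are about the return value.

-- ===== PORT A =====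
def arrange_arr (arr : List Int) : List Int :=
  let n := arr.length
  -- for i in range(n): toggle between arr[large] (decrement) and arr[small] (increment)
  let st := (List.range n).foldl (fun st i =>
      match st with
      | (temp, small, large, flag) =>
        if flag then (temp.set i (PySem.List.pyGet? arr large), small, large - 1, !flag)
        else (temp.set i (PySem.List.pyGet? arr small), small + 1, large, !flag))
    (List.replicate n (none : Option Int), (0 : Int), (n : Int) - 1, true)
  let temp := st.1
  -- for i in range(n): arr[i] = temp[i]  (every slot was assigned, the defaults are never read)
  (List.range n).foldl (fun a i => a.set i ((temp.getD i none).getD 0)) arr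

-- ===== PORT B =====
-- result[0::2] = xs; result[1::2] = ys  (strided slice assignment into a fresh list)
def pvInterleave : List Int → List Int → List Int
  | [], _ => []
  | x :: xs, ys => x :: pvInterleave ys xs
termination_by xs ys => xs.length + ys.length
decreasing_by simp; omega

def arrange_arr_alt (arr : List Int) : List Int :=
  let n := arr.length
  let rev := (PySem.List.slice? arr none none (-1)).getD []   -- arr[::-1]; step ≠ 0, never none
  let result := pvInterleave (rev.take ((n + 1) / 2)) (arr.take (n / 2))
  -- for i in range(n): arr[i] = result[i]  (i < n = len result, the default is never read)
  (List.range n).foldl (fun a i => a.set i (result.getD i 0)) arr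

-- ===== PRECONDITION & SPEC =====
def Spec_arrange_arr (arr : List Int) (out : List Int) : Prop := out = arrange_arr_alt arr
instance (arr : List Int) (out : List Int) : Decidable (Spec_arrange_arr arr out) := by unfold Spec_arrange_arr; infer_instance

-- ===== CLAIM (what is proved, stated in full; the proofs are below) =====
def Claim_equal_arrange_arr : Prop := ∀ (arr : List Int), Dom_arrange_arr arr → Spec_arrange_arr arr (arrange_arr arr)

-- ===== LEMMAS AND PROOFS =====

-- the value A's first loop stores in slot i (and B places at index i)
def pvVal (arr : List Int) (i : Nat) : Int :=
  if i % 2 = 0 then arr.getD (arr.length - 1 - i / 2) 0 else arr.getD (i / 2) 0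

theorem pvFoldlSet_getElem? (g : Nat → Int) (a : List Int) (k j : Nat) :
    ((List.range k).foldl (fun a i => a.set i (g i)) a)[j]? =
      if j < k ∧ j < a.length then some (g j) else a[j]? := by
  induction k with
  | zero => simp
  | succ k ih =>
    rw [List.range_succ, List.foldl_append]
    simp only [List.foldl_cons, List.foldl_nil, List.getElem?_set]
    have hlen : ∀ m : Nat, ((List.range m).foldl (fun a i => a.set i (g i)) a).length = a.length := by
      intro m
      induction m with
      | zero => simp
      | succ m ihm => rw [List.range_succ, List.foldl_append]; simpa using ihm
    rw [hlen k, ih]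
    by_cases hkj : k = j
    · subst hkj
      by_cases h : k < a.length
      · simp [h]
      · simp [h]
    · by_cases h1 : j < k
      · simp [hkj, h1, Nat.lt_succ_of_lt h1]
      · have : ¬ j < k + 1 := by omega
        simp [hkj, h1, this]

theorem pvInterleaveAux (N : Nat) : ∀ (xs ys : List Int) (j : Nat),
    xs.length + ys.length ≤ N → ys.length ≤ xs.length → xs.length ≤ ys.length + 1 →
    (pvInterleave xs ys)[j]? = if j % 2 = 0 then xs[j / 2]? else ys[j / 2]? := by
  induction N with
  | zero =>
    intro xs ys j hN h1 h2
    have hx : xs = [] := List.eq_nil_of_length_eq_zero (by omega)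
    have hy : ys = [] := List.eq_nil_of_length_eq_zero (by omega)
    subst hx; subst hy
    simp [pvInterleave]
  | succ N ih =>
    intro xs ys j hN h1 h2
    match xs, j with
    | [], j =>
      have hy : ys = [] := by simpa using h1
      subst hy
      simp [pvInterleave]
    | x :: xs, 0 => simp [pvInterleave]
    | x :: xs, j + 1 =>
      simp only [pvInterleave, List.getElem?_cons_succ]
      rw [ih ys xs j (by simp at hN; omega) (by simp at h2; omega) (by simp at h1; omega)]
      rcases Nat.even_or_odd j with ⟨m, hm⟩ | ⟨m, hm⟩
      · have e1 : j % 2 = 0 := by omega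
        have e2 : (j + 1) % 2 ≠ 0 := by omega
        have e3 : (j + 1) / 2 = j / 2 := by omega
        simp [e1, e2, e3]
      · have e1 : j % 2 ≠ 0 := by omega
        have e2 : (j + 1) % 2 = 0 := by omega
        have e3 : (j + 1) / 2 = j / 2 + 1 := by omega
        simp [e1, e2, e3]

theorem pvInterleave_getElem? (xs ys : List Int) (j : Nat)
    (h1 : ys.length ≤ xs.length) (h2 : xs.length ≤ ys.length + 1) :
    (pvInterleave xs ys)[j]? = if j % 2 = 0 then xs[j / 2]? else ys[j / 2]? :=
  pvInterleaveAux (xs.length + ys.length) xs ys j le_rfl h1 h2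

-- setting slot k extends the prefix of filled slots
theorem pvTempSet (arr : List Int) (k : Nat) (h : k < arr.length) :
    ((List.range arr.length).map (fun i => if i < k then some (pvVal arr i) else none)).set k
        (some (pvVal arr k)) =
      (List.range arr.length).map (fun i => if i < k + 1 then some (pvVal arr i) else none) := by
  apply List.ext_getElem?
  intro j
  simp only [List.getElem?_set, List.length_map, List.length_range, List.getElem?_map]
  by_cases hkj : k = j
  · subst hkj; simp [h]
  · by_cases hj : j < arr.length
    · have e : (j ≤ k) = (j < k) := by
        apply propext; constructor <;> intro <;> omega
      simp [hkj, hj, e]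
    · simp [hkj, hj]

-- closed form of A's first loop after k of the n steps
theorem pvALoop (arr : List Int) (k : Nat) (hk : k ≤ arr.length) :
    ((List.range k).foldl (fun st i =>
        match st with
        | (temp, small, large, flag) =>
          if flag then (temp.set i (PySem.List.pyGet? arr large), small, large - 1, !flag)
          else (temp.set i (PySem.List.pyGet? arr small), small + 1, large, !flag))
      (List.replicate arr.length (none : Option Int), (0 : Int), (arr.length : Int) - 1, true)) =
      ((List.range arr.length).map (fun i => if i < k then some (pvVal arr i) else none),
       ((k / 2 : Nat) : Int),
       (arr.length : Int) - 1 - (((k + 1) / 2 : Nat) : Int),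
       decide (k % 2 = 0)) := by
  induction k with
  | zero =>
    simp [List.map_const']
  | succ k ih =>
    have hkn : k < arr.length := by omega
    rw [List.range_succ, List.foldl_append, ih (by omega)]
    simp only [List.foldl_cons, List.foldl_nil]
    by_cases hpar : k % 2 = 0
    · -- flag is true: take from the large end
      have hidx : k / 2 ≤ arr.length - 1 := by omega
      have hcast : (arr.length : Int) - 1 - (((k + 1) / 2 : Nat) : Int) =
          ((arr.length - 1 - k / 2 : Nat) : Int) := by
        have : (k + 1) / 2 = k / 2 := by omega
        rw [this]; omega
      have hm : arr.length - 1 - k / 2 < arr.length := by omega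
      have hget : PySem.List.pyGet? arr ((arr.length : Int) - 1 - (((k + 1) / 2 : Nat) : Int)) =
          some (pvVal arr k) := by
        rw [hcast, PySem.List.pyGet?_natCast, List.getElem?_eq_getElem hm]
        simp [pvVal, hpar, List.getElem?_eq_getElem hm]
      simp only [hpar, decide_true, if_true, Bool.not_true, hget, pvTempSet arr k hkn]
      refine congrArg₂ _ rfl (congrArg₂ _ ?_ (congrArg₂ _ ?_ ?_))
      · congr 1; omega
      · have h1 : (k + 1) / 2 = k / 2 := by omega
        have h2 : (k + 1 + 1) / 2 = k / 2 + 1 := by omega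
        rw [h1, h2]; push_cast; ring
      · have : (k + 1) % 2 = 1 := by omega
        simp [this]
    · -- flag is false: take from the small end
      have hidx : k / 2 < arr.length := by omega
      have hget : PySem.List.pyGet? arr ((k / 2 : Nat) : Int) = some (pvVal arr k) := by
        rw [PySem.List.pyGet?_natCast, List.getElem?_eq_getElem hidx]
        simp [pvVal, hpar, List.getElem?_eq_getElem hidx]
      simp only [hpar, decide_false, Bool.false_eq_true, if_false, Bool.not_false, hget,
        pvTempSet arr k hkn]
      refine congrArg₂ _ rfl (congrArg₂ _ ?_ (congrArg₂ _ ?_ ?_))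
      · have h1 : (k + 1) / 2 = k / 2 + 1 := by omega
        rw [h1]; push_cast; ring
      · have h2 : (k + 1 + 1) / 2 = (k + 1) / 2 := by omega
        rw [h2]
      · have : (k + 1) % 2 = 0 := by omega
        simp [this]

theorem arrange_arr_spec : Claim_equal_arrange_arr := by
  unfold Claim_equal_arrange_arr Spec_arrange_arr
  intro arr _
  unfold arrange_arr arrange_arr_alt
  simp only [PySem.List.slice?_none_none_neg_one, Option.getD_some]
  rw [pvALoop arr arr.length le_rfl]
  apply List.ext_getElem?
  intro j
  rw [pvFoldlSet_getElem?, pvFoldlSet_getElem?]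
  by_cases hj : j < arr.length
  · simp only [hj, and_self, if_true]
    congr 1
    -- A's value at j
    have hA : (((List.range arr.length).map
        (fun i => if i < arr.length then some (pvVal arr i) else none)).getD j none).getD 0 =
        pvVal arr j := by
      rw [List.getD_eq_getElem?_getD]
      simp [hj]
    rw [hA]
    -- B's value at j
    have hlen1 : (arr.reverse.take ((arr.length + 1) / 2)).length = (arr.length + 1) / 2 := by
      simp; omega
    have hlen2 : (arr.take (arr.length / 2)).length = arr.length / 2 := by
      simp; omega
    rw [List.getD_eq_getElem?_getD,
      pvInterleave_getElem? _ _ j (by rw [hlen1, hlen2]; omega) (by rw [hlen1, hlen2]; omega)]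
    by_cases hpar : j % 2 = 0
    · have h2 : j / 2 < (arr.length + 1) / 2 := by omega
      have h3 : j / 2 < arr.length := by omega
      rw [if_pos hpar, List.getElem?_take_of_lt h2, List.getElem?_reverse h3]
      have h4 : arr.length - 1 - j / 2 < arr.length := by omega
      rw [List.getElem?_eq_getElem h4]
      simp [pvVal, hpar, List.getElem?_eq_getElem h4]
    · have h2 : j / 2 < arr.length / 2 := by omega
      have h3 : j / 2 < arr.length := by omega
      rw [if_neg hpar, List.getElem?_take_of_lt h2, List.getElem?_eq_getElem h3]
      simp [pvVal, hpar, List.getElem?_eq_getElem h3]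
  · simp [hj]
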